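-- pv_equiv track=rewrite | github.com/w-ash/mixd | src/infrastructure/connectors/_shared/error_classification.py | classify_text_patterns
-- ===== SOURCE A (Python) =====
-- def classify_text_patterns(error_str: str) -> tuple[str, str, str] | None:
--     """Classify errors based on text patterns in error messages.
--
--     This provides fallback classification when HTTP status isn't available
--     or for more specific error detection.
--
--     Args:
--         error_str: Error message text
--
--     Returns:
--         (error_type, error_code, error_description) or None if no pattern matches
--     """
--     error_lower = error_str.lower()
--
--     # Rate limit patterns - highest priority for text-based detection
--     if any(
--         pattern in error_lower
--         for pattern in ["rate limit", "rate_limit", "too many", "quota", "throttle"]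
--     ):
--         return ("rate_limit", "text", "Rate limit detected from response text")
--
--     # Network and connection errors - temporary
--     if any(
--         pattern in error_lower
--         for pattern in ["timeout", "connection", "network", "dns", "ssl"]
--     ):
--         return ("temporary", "network", "Network or connection error")
--
--     # Authentication/authorization errors - permanent
--     if any(
--         pattern in error_lower
--         for pattern in [
--             "unauthorized",
--             "forbidden",
--             "invalid token",
--             "invalid api key",
--             "authentication failed",
--             "token expired",
--             "expired token",
--             "invalid access",
--             "has expired",
--             "invalid_grant",  # OAuth error
--             "invalid_client",  # OAuth error
--             "access_denied",  # OAuth error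
--         ]
--     ):
--         return ("permanent", "auth", "Authentication or authorization error")
--
--     # Not found patterns
--     if any(
--         pattern in error_lower
--         for pattern in [
--             "not found",
--             "not_found",
--             "does not exist",
--             "no such",
--             "invalid id",
--         ]
--     ):
--         return ("not_found", "text", "Resource not found")
--
--     # Temporary service issues
--     if any(
--         pattern in error_lower
--         for pattern in [
--             "service temporarily unavailable",
--             "server error",
--             "server_error",
--             "internal error",
--             "try again",
--             "temporarily",
--             "unavailable",
--         ]
--     ):
--         return ("temporary", "text", "Service temporarily unavailable")
--
--     # No pattern matched
--     return None
-- ===== SOURCE B (Python) =====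
-- # B: flat pattern -> rule-index dictionary; one pass keeps the MINIMUM matching
-- # rule index (instead of A's ordered group scan with early return), then the
-- # result is looked up in a results array. Same answer since A returns the
-- # lowest-index matching group's result.
-- _RESULTS = [
--     ("rate_limit", "text", "Rate limit detected from response text"),
--     ("temporary", "network", "Network or connection error"),
--     ("permanent", "auth", "Authentication or authorization error"),
--     ("not_found", "text", "Resource not found"),
--     ("temporary", "text", "Service temporarily unavailable"),
-- ]
--
-- _PATTERN_INDEX = {
--     "rate limit": 0, "rate_limit": 0, "too many": 0, "quota": 0, "throttle": 0,
--     "timeout": 1, "connection": 1, "network": 1, "dns": 1, "ssl": 1,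
--     "unauthorized": 2, "forbidden": 2, "invalid token": 2, "invalid api key": 2,
--     "authentication failed": 2, "token expired": 2, "expired token": 2,
--     "invalid access": 2, "has expired": 2, "invalid_grant": 2,
--     "invalid_client": 2, "access_denied": 2,
--     "not found": 3, "not_found": 3, "does not exist": 3, "no such": 3,
--     "invalid id": 3,
--     "service temporarily unavailable": 4, "server error": 4, "server_error": 4,
--     "internal error": 4, "try again": 4, "temporarily": 4, "unavailable": 4,
-- }
--
--
-- def classify_text_patterns(error_str: str) -> tuple[str, str, str] | None:
--     error_lower = error_str.lower()
--     best = None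
--     for pattern, idx in _PATTERN_INDEX.items():
--         if pattern in error_lower:
--             best = idx if best is None else min(best, idx)
--     return None if best is None else _RESULTS[best]
-- ===== Notes on version B (the rewrite author's own statement) =====
-- stated objective: alternative
-- what changed: Replaces A's five short-circuiting if-blocks by a flat pattern-to-rule-index dictionary scanned in a single full pass that keeps the minimum matching rule index, with the result looked up in a results array.
import Mathlib
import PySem

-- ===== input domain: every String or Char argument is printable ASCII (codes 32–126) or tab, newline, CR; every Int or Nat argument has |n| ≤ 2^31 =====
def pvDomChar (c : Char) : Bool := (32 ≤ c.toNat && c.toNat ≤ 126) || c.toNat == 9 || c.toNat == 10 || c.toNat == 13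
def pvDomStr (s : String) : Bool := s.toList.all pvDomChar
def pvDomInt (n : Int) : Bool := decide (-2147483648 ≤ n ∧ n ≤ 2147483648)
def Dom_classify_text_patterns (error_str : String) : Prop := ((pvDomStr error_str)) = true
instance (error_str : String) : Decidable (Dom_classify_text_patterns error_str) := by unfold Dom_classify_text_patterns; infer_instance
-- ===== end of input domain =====

-- B replaces A's five short-circuiting if-blocks by a flat pattern→rule-index table scanned
-- in one full pass keeping the minimum matching rule index, looked up in a results array (alternative).
-- ===== PORT A =====
def classify_text_patterns (error_str : String) : Option (String × String × String) :=
  let error_lower := PySem.Str.lower error_str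
  if (["rate limit", "rate_limit", "too many", "quota", "throttle"].any
      (fun p => PySem.Str.isIn p error_lower)) then
    some ("rate_limit", "text", "Rate limit detected from response text")
  else if (["timeout", "connection", "network", "dns", "ssl"].any
      (fun p => PySem.Str.isIn p error_lower)) then
    some ("temporary", "network", "Network or connection error")
  else if (["unauthorized", "forbidden", "invalid token", "invalid api key",
      "authentication failed", "token expired", "expired token", "invalid access",
      "has expired", "invalid_grant", "invalid_client", "access_denied"].any
      (fun p => PySem.Str.isIn p error_lower)) then
    some ("permanent", "auth", "Authentication or authorization error")
  else if (["not found", "not_found", "does not exist", "no such", "invalid id"].any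
      (fun p => PySem.Str.isIn p error_lower)) then
    some ("not_found", "text", "Resource not found")
  else if (["service temporarily unavailable", "server error", "server_error",
      "internal error", "try again", "temporarily", "unavailable"].any
      (fun p => PySem.Str.isIn p error_lower)) then
    some ("temporary", "text", "Service temporarily unavailable")
  else
    none

-- ===== PORT B =====
-- B's results array (_RESULTS).
def pvResults : List (String × String × String) :=
  [ ("rate_limit", "text", "Rate limit detected from response text"),
    ("temporary", "network", "Network or connection error"),
    ("permanent", "auth", "Authentication or authorization error"),
    ("not_found", "text", "Resource not found"),
    ("temporary", "text", "Service temporarily unavailable") ]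

-- B's flat pattern → rule-index dictionary (_PATTERN_INDEX, association list in insertion order).
def pvPatternIndex : List (String × Nat) :=
  [ ("rate limit", 0), ("rate_limit", 0), ("too many", 0), ("quota", 0), ("throttle", 0),
    ("timeout", 1), ("connection", 1), ("network", 1), ("dns", 1), ("ssl", 1),
    ("unauthorized", 2), ("forbidden", 2), ("invalid token", 2), ("invalid api key", 2),
    ("authentication failed", 2), ("token expired", 2), ("expired token", 2),
    ("invalid access", 2), ("has expired", 2), ("invalid_grant", 2),
    ("invalid_client", 2), ("access_denied", 2),
    ("not found", 3), ("not_found", 3), ("does not exist", 3), ("no such", 3),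
    ("invalid id", 3),
    ("service temporarily unavailable", 4), ("server error", 4), ("server_error", 4),
    ("internal error", 4), ("try again", 4), ("temporarily", 4), ("unavailable", 4) ]

-- B's loop body: update `best` with the rule index of a matching pattern (min of matches).
def pvStep (el : String) (best : Option Nat) (pi : String × Nat) : Option Nat :=
  if PySem.Str.isIn pi.1 el then
    some (match best with | none => pi.2 | some j => min j pi.2)
  else best

def classify_text_patterns_alt (error_str : String) : Option (String × String × String) :=
  let error_lower := PySem.Str.lower error_str
  let best := pvPatternIndex.foldl (pvStep error_lower) none
  match best with
  | none => none
  | some i => PySem.List.pyGet? pvResults (Int.ofNat i)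

-- ===== PRECONDITION & SPEC =====
def Spec_classify_text_patterns (error_str : String) (out : Option (String × String × String)) : Prop := out = classify_text_patterns_alt error_str
instance (error_str : String) (out : Option (String × String × String)) : Decidable (Spec_classify_text_patterns error_str out) := by unfold Spec_classify_text_patterns; infer_instance

-- ===== CLAIM (what is proved, stated in full; the proofs are below) =====
def Claim_equal_classify_text_patterns : Prop := ∀ (error_str : String), Dom_classify_text_patterns error_str → Spec_classify_text_patterns error_str (classify_text_patterns error_str)

-- ===== LEMMAS AND PROOFS =====
-- Folding B's step over a block of patterns that all map to index i.
lemma pvGroupFold (el : String) (i : Nat) (l : List String) (acc : Option Nat) :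
    List.foldl (pvStep el) acc (l.map (fun p => (p, i))) =
    if l.any (fun p => PySem.Str.isIn p el) then some (acc.elim i (fun j => min j i)) else acc := by
  induction l generalizing acc with
  | nil => simp
  | cons p t ih =>
    simp only [List.map_cons, List.foldl_cons, List.any_cons]
    by_cases h : PySem.Str.isIn p el = true
    · simp only [pvStep, h, if_true, Bool.true_or]
      rw [ih]
      cases acc with
      | none => split <;> simp
      | some j => split <;> simp
    · rw [Bool.not_eq_true] at h
      simp only [pvStep, h, Bool.false_eq_true, if_false, Bool.false_or]
      exact ih acc

-- A's five pattern groups, as named lists (proof helpers).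
def pvG0 : List String := ["rate limit", "rate_limit", "too many", "quota", "throttle"]
def pvG1 : List String := ["timeout", "connection", "network", "dns", "ssl"]
def pvG2 : List String := ["unauthorized", "forbidden", "invalid token", "invalid api key",
  "authentication failed", "token expired", "expired token", "invalid access",
  "has expired", "invalid_grant", "invalid_client", "access_denied"]
def pvG3 : List String := ["not found", "not_found", "does not exist", "no such", "invalid id"]
def pvG4 : List String := ["service temporarily unavailable", "server error", "server_error",
  "internal error", "try again", "temporarily", "unavailable"]

lemma pvFlat : pvPatternIndex =
    pvG0.map (fun p => (p, 0)) ++ pvG1.map (fun p => (p, 1)) ++ pvG2.map (fun p => (p, 2))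
      ++ pvG3.map (fun p => (p, 3)) ++ pvG4.map (fun p => (p, 4)) := rfl

-- ===== VERDICT (by name: the statement is the Claim_ definition above) =====
theorem classify_text_patterns_spec : Claim_equal_classify_text_patterns := by
  intro s _
  show classify_text_patterns s = classify_text_patterns_alt s
  simp only [classify_text_patterns, classify_text_patterns_alt]
  rw [pvFlat]
  simp only [List.foldl_append, pvGroupFold, pvG0, pvG1, pvG2, pvG3, pvG4]
  generalize (["rate limit", "rate_limit", "too many", "quota", "throttle"].any
      (fun p => PySem.Str.isIn p (PySem.Str.lower s))) = b0
  generalize (["timeout", "connection", "network", "dns", "ssl"].any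
      (fun p => PySem.Str.isIn p (PySem.Str.lower s))) = b1
  generalize (["unauthorized", "forbidden", "invalid token", "invalid api key",
      "authentication failed", "token expired", "expired token", "invalid access",
      "has expired", "invalid_grant", "invalid_client", "access_denied"].any
      (fun p => PySem.Str.isIn p (PySem.Str.lower s))) = b2
  generalize (["not found", "not_found", "does not exist", "no such", "invalid id"].any
      (fun p => PySem.Str.isIn p (PySem.Str.lower s))) = b3
  generalize (["service temporarily unavailable", "server error", "server_error",
      "internal error", "try again", "temporarily", "unavailable"].any
      (fun p => PySem.Str.isIn p (PySem.Str.lower s))) = b4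
  revert b0 b1 b2 b3 b4
  decide
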